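-- pv_equiv track=rewrite | github.com/tsuru7/algorithm-study | AtCoder/ABC/201-300/ABC250/D-2.py | solve
-- ===== SOURCE A (Python) =====
-- class Eratosthenes:
--     def __init__(self, n):
--         self.n = n
--         self.primes = [True for _ in range(n+1)]
--         self.primes[0] = False
--         self.primes[1] = False
--         i = 2
--         x = i
--         while x + i <= n:
--             x += i
--             self.primes[x] = False
--         for i in range(3, n+1, 2):
--             if i*i > n:
--                 break
--             if not self.primes[i]:
--                 continue
--             x = i
--             while x + i <= n:
--                 x += i
--                 self.primes[x] = False
--         return
--
--     def isPrime(self, x):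
--         return self.primes[x]
--
--     def getPrimes(self):
--         return self.primes
--
--     def getPrimeList(self):
--         primeList = []
--         for i, flg in enumerate(self.primes):
--             if flg:
--                 primeList.append(i)
--         return primeList
--
-- def solve(n):
--     primeList = Eratosthenes(10**6).getPrimeList()
--     prime3List = [x*x*x for x in primeList]
--
--     ans=0
--     for i, pi in enumerate(primeList):
--         wa = len(prime3List)
--         ac = 0
--         while wa - ac > 1:
--             wj = (wa + ac) // 2
--             if prime3List[wj]*pi > n:
--                 wa = wj
--             else:
--                 ac = wj
--         j = ac
--         qj = primeList[j]
--         ans += max(0, j-i)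
--
--     return ans
-- ===== SOURCE B (Python) =====
-- class Eratosthenes:
--     def __init__(self, n):
--         self.n = n
--         self.primes = [True for _ in range(n+1)]
--         self.primes[0] = False
--         self.primes[1] = False
--         i = 2
--         x = i
--         while x + i <= n:
--             x += i
--             self.primes[x] = False
--         for i in range(3, n+1, 2):
--             if i*i > n:
--                 break
--             if not self.primes[i]:
--                 continue
--             x = i
--             while x + i <= n:
--                 x += i
--                 self.primes[x] = False
--         return
--
--     def getPrimeList(self):
--         primeList = []
--         for i, flg in enumerate(self.primes):
--             if flg:
--                 primeList.append(i)
--         return primeList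
--
--
-- def solve(n):
--     # Same sieve; the per-prime binary search is replaced by a short linear
--     # prefix scan of the sorted cube list (count leading cubes q^3*p <= n),
--     # the partner index being count-1.
--     primeList = Eratosthenes(10**6).getPrimeList()
--     prime3List = [x*x*x for x in primeList]
--
--     ans = 0
--     for i, pi in enumerate(primeList):
--         c = 0
--         for q3 in prime3List:
--             if q3 * pi > n:
--                 break
--             c += 1
--         ans += max(0, c - 1 - i)
--     return ans
-- ===== Notes on version B (the rewrite author's own statement) =====
-- stated objective: simpler
-- what changed: A's per-prime binary search over the cube list (17 probe steps each) is replaced by a linear prefix scan of the sorted cube list that counts the leading cubes q^3*p <= n and uses count-1 as the partner index; the sieve and the cube list are unchanged.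
import Mathlib
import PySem

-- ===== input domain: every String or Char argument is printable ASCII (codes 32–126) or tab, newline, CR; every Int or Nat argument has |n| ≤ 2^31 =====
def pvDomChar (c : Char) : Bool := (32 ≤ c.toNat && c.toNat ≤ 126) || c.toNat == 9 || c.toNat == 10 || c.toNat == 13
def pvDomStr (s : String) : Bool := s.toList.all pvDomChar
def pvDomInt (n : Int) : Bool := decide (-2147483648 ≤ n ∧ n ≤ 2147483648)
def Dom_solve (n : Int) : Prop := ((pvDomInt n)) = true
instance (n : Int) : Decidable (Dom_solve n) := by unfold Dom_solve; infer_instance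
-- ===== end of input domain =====

-- B replaces A's per-prime binary search over the sorted cube list by a linear prefix
-- scan (count the leading cubes with q^3*p <= n); the sieve and the cube list are unchanged.

-- ===== PORT A =====
-- Eratosthenes.__init__: the inner 'while x + i <= n: x += i; primes[x] = False'.
-- The '0 < i' conjunct is only a totality guard (every call site passes i ≥ 2).
def pvMarkMult (nn i x : Nat) (arr : Array Bool) : Array Bool :=
  if _h : 0 < i ∧ x + i ≤ nn then pvMarkMult nn i (x + i) (arr.set! (x + i) false) else arr
  termination_by nn - x
  decreasing_by omega

-- 'for i in range(3, n+1, 2): if i*i > n: break; if not primes[i]: continue; <mark multiples>'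
def pvOddLoop (nn : Nat) (is : List Nat) (arr : Array Bool) : Array Bool :=
  match is with
  | [] => arr
  | i :: rest =>
    if i * i > nn then arr
    else if arr[i]! = false then pvOddLoop nn rest arr
    else pvOddLoop nn rest (pvMarkMult nn i i arr)

-- the flag array built by Eratosthenes(10**6) (a Python list of bools → Array Bool)
def pvSieve : Array Bool :=
  let arr := ((Array.replicate (10 ^ 6 + 1) true).set! 0 false).set! 1 false
  let arr := pvMarkMult (10 ^ 6) 2 2 arr
  -- range(3, 10**6 + 1, 2) = 3, 5, …, 999999 (499999 elements)
  pvOddLoop (10 ^ 6) (List.range' 3 499999 2) arr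

-- getPrimeList: 'for i, flg in enumerate(self.primes): if flg: primeList.append(i)'
def pvGetPrimeList (flags : Array Bool) : List Int :=
  ((List.range flags.size).foldl
      (fun acc i => if flags[i]! then acc.push (Int.ofNat i) else acc) #[]).toList

def pvPrimeList : List Int := pvGetPrimeList pvSieve

def pvCubes : List Int := pvPrimeList.map (fun x => x * x * x)

-- Python indexes prime3List (a list, O(1) access): kept as an Array on the Lean side
def pvCubesArr : Array Int := pvCubes.toArray

-- A's binary search: 'while wa - ac > 1: wj = (wa+ac)//2; …'
def pvBSearch (a : Array Int) (pi n : Int) (wa ac : Nat) : Nat :=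
  if wa - ac > 1 then
    let wj := (wa + ac) / 2
    if a[wj]! * pi > n then pvBSearch a pi n wj ac else pvBSearch a pi n wa wj
  else ac
  termination_by wa - ac
  decreasing_by all_goals omega

-- 'for i, pi in enumerate(primeList): …': the loop body, with the running index i
-- and the accumulator ans as loop state
def pvLoopA (n : Int) (primeList : List Int) (prime3Len : Nat) :
    List Int → Int → Int → Int
  | [], ans, _i => ans
  | pi :: rest, ans, i =>
    let j := pvBSearch pvCubesArr pi n prime3Len 0
    let _qj := primeList[j]!   -- 'qj = primeList[j]' (unused in A)
    pvLoopA n primeList prime3Len rest (ans + max 0 ((j : Int) - i)) (i + 1)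

def solve (n : Int) : Int :=
  let primeList := pvPrimeList
  let prime3List := pvCubes
  pvLoopA n primeList prime3List.length primeList 0 0

-- ===== PORT B =====
-- 'c = 0; for q3 in prime3List: if q3*pi > n: break; c += 1'
def pvCntWhile (cubes : List Int) (pi n : Int) : Int :=
  match cubes with
  | [] => 0
  | q3 :: rest => if q3 * pi > n then 0 else 1 + pvCntWhile rest pi n

-- 'for i, pi in enumerate(primeList): … ans += max(0, c - 1 - i)'
def pvLoopB (n : Int) : List Int → Int → Int → Int
  | [], ans, _i => ans
  | pi :: rest, ans, i =>
    pvLoopB n rest (ans + max 0 (pvCntWhile pvCubes pi n - 1 - i)) (i + 1)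

def solve_alt (n : Int) : Int := pvLoopB n pvPrimeList 0 0

-- ===== PRECONDITION & SPEC =====
def Spec_solve (n : Int) (out : Int) : Prop := out = solve_alt n
instance (n : Int) (out : Int) : Decidable (Spec_solve n out) := by unfold Spec_solve; infer_instance

-- ===== CLAIM (what is proved, stated in full; the proofs are below) =====
def Claim_equal_solve : Prop := ∀ (n : Int), Dom_solve n → Spec_solve n (solve n)

-- ===== LEMMAS AND PROOFS =====

-- the push-accumulator loop of pvGetPrimeList is filter-then-map
theorem pv_foldl_push_filter (f : Nat → Bool) :
    ∀ (l : List Nat) (acc : Array Int),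
      ((l.foldl (fun acc i => if f i then acc.push (Int.ofNat i) else acc) acc)).toList
        = acc.toList ++ (l.filter f).map Int.ofNat := by
  intro l
  induction l with
  | nil => simp
  | cons i rest ih =>
    intro acc
    simp only [List.foldl_cons, List.filter_cons]
    cases h : f i
    · simp only [Bool.false_eq_true, if_false]
      exact ih acc
    · simp only [if_true]
      rw [ih, Array.toList_push]
      simp

theorem pvGetPrimeList_eq (flags : Array Bool) :
    pvGetPrimeList flags
      = ((List.range flags.size).filter (fun i => flags[i]!)).map Int.ofNat := by
  unfold pvGetPrimeList
  rw [pv_foldl_push_filter]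
  rfl

theorem pvPrimeList_eq :
    pvPrimeList = ((List.range pvSieve.size).filter (fun i => pvSieve[i]!)).map Int.ofNat := by
  unfold pvPrimeList
  exact pvGetPrimeList_eq pvSieve

theorem pvPrimeList_nonneg : ∀ p ∈ pvPrimeList, 0 ≤ p := by
  intro p hp
  rw [pvPrimeList_eq] at hp
  obtain ⟨i, _, rfl⟩ := List.mem_map.mp hp
  exact Int.natCast_nonneg i

theorem pvCubes_pairwise : pvCubes.Pairwise (· ≤ ·) := by
  unfold pvCubes
  rw [pvPrimeList_eq, List.map_map]
  refine List.Pairwise.map _ ?_ (List.Pairwise.filter _ List.pairwise_lt_range)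
  intro a b hab
  simp only [Function.comp]
  have h : a ≤ b := Nat.le_of_lt hab
  have h3 : a * a * a ≤ b * b * b := Nat.mul_le_mul (Nat.mul_le_mul h h) h
  simp only [← Int.natCast_mul, Int.ofNat_eq_natCast]
  exact_mod_cast h3

theorem pvCubes_mono {i j : Nat} (hij : i ≤ j) (hj : j < pvCubes.length) :
    pvCubes[i]! ≤ pvCubes[j]! := by
  have hi : i < pvCubes.length := Nat.lt_of_le_of_lt hij hj
  rw [getElem!_pos pvCubes i hi, getElem!_pos pvCubes j hj]
  rcases Nat.lt_or_ge i j with h | h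
  · exact List.pairwise_iff_getElem.mp pvCubes_pairwise i j hi hj h
  · have hij' : i = j := Nat.le_antisymm hij h
    subst hij'
    exact le_refl _

-- prefix-count facts for pvCntWhile (no ordering assumptions needed)
theorem pvCntWhile_nonneg (cs : List Int) (p n : Int) : 0 ≤ pvCntWhile cs p n := by
  induction cs with
  | nil => simp [pvCntWhile]
  | cons q rest ih => simp only [pvCntWhile]; split <;> omega

theorem pvCntWhile_le_length (cs : List Int) (p n : Int) :
    pvCntWhile cs p n ≤ (cs.length : Int) := by
  induction cs with
  | nil => simp [pvCntWhile]
  | cons q rest ih =>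
    simp only [pvCntWhile, List.length_cons]
    split
    · push_cast; omega
    · push_cast; omega

theorem pvCntWhile_valid (cs : List Int) (p n : Int) :
    ∀ j : Nat, (j : Int) < pvCntWhile cs p n → cs[j]! * p ≤ n := by
  induction cs with
  | nil => simp [pvCntWhile]
  | cons q rest ih =>
    intro j hj
    simp only [pvCntWhile] at hj
    split at hj
    · omega
    · rename_i hq
      cases j with
      | zero => simpa using Int.not_lt.mp hq
      | succ j' =>
        have h' := ih j' (by push_cast at hj ⊢; omega)
        simpa using h'

theorem pvCntWhile_stop (cs : List Int) (p : Int) (n : Int) :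
    ∀ k : Nat, (k : Int) = pvCntWhile cs p n → k < cs.length → cs[k]! * p > n := by
  induction cs with
  | nil => intro k _ hk; simp at hk
  | cons q rest ih =>
    intro k hk hkL
    simp only [pvCntWhile] at hk
    split at hk
    · rename_i hq
      have hk0 : k = 0 := by omega
      subst hk0
      simpa using hq
    · cases k with
      | zero =>
        exfalso
        have := pvCntWhile_nonneg rest p n
        omega
      | succ k' =>
        have h' := ih k' (by push_cast at hk ⊢; omega) (by simpa using hkL)
        simpa using h'

-- characterisation of A's binary search on a list whose scaled values are downward closed
theorem pvBSearch_step (a : Array Int) (p n : Int) (wa ac : Nat) (h : wa - ac > 1) :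
    pvBSearch a p n wa ac
      = if a[(wa + ac) / 2]! * p > n then pvBSearch a p n ((wa + ac) / 2) ac
        else pvBSearch a p n wa ((wa + ac) / 2) := by
  conv_lhs => rw [pvBSearch]
  rw [if_pos h]

theorem pvBSearch_exit (a : Array Int) (p n : Int) (wa ac : Nat) (h : ¬ wa - ac > 1) :
    pvBSearch a p n wa ac = ac := by
  conv_lhs => rw [pvBSearch]
  rw [if_neg h]

theorem pvBSearch_props (cs : List Int) (p n : Int) :
    ∀ (m wa ac : Nat), wa - ac ≤ m → ac < wa → wa ≤ cs.length →
      (ac = 0 ∨ cs[ac]! * p ≤ n) → (wa = cs.length ∨ cs[wa]! * p > n) →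
      (pvBSearch cs.toArray p n wa ac = 0 ∨ cs[pvBSearch cs.toArray p n wa ac]! * p ≤ n) ∧
      (pvBSearch cs.toArray p n wa ac + 1 = cs.length ∨
        cs[pvBSearch cs.toArray p n wa ac + 1]! * p > n) ∧
      pvBSearch cs.toArray p n wa ac < cs.length := by
  intro m
  induction m with
  | zero => intro wa ac hm h1; omega
  | succ m ih =>
    intro wa ac hm h1 h2 h3 h4
    by_cases hgt : wa - ac > 1
    · rw [pvBSearch_step cs.toArray p n wa ac hgt]
      by_cases ht : cs.toArray[(wa + ac) / 2]! * p > n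
      · rw [if_pos ht]
        rw [List.getElem!_toArray] at ht
        exact ih ((wa + ac) / 2) ac (by omega) (by omega) (by omega) h3 (Or.inr ht)
      · rw [if_neg ht]
        rw [List.getElem!_toArray] at ht
        exact ih wa ((wa + ac) / 2) (by omega) (by omega) h2
          (Or.inr (Int.not_lt.mp ht)) h4
    · rw [pvBSearch_exit cs.toArray p n wa ac hgt]
      have hwa : wa = ac + 1 := by omega
      refine ⟨h4.elim (fun _ => h3) (fun _ => h3), ?_, by omega⟩
      rw [← hwa]
      exact h4

theorem pvCubesArr_eq : pvCubesArr = pvCubes.toArray := rfl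

-- the pointwise bridge: A's per-prime term equals B's per-prime term
theorem pv_term_eq (n p i : Int) (hp : 0 ≤ p) (hi : 0 ≤ i) :
    max 0 ((pvBSearch pvCubesArr p n pvCubes.length 0 : Int) - i)
      = max 0 (pvCntWhile pvCubes p n - 1 - i) := by
  have hcnt0 : 0 ≤ pvCntWhile pvCubes p n := pvCntWhile_nonneg pvCubes p n
  have hcntL : pvCntWhile pvCubes p n ≤ (pvCubes.length : Int) :=
    pvCntWhile_le_length pvCubes p n
  rcases Nat.eq_zero_or_pos pvCubes.length with hL | hL
  · -- empty cube list: the while loop does not run, j = ac = 0; the scan counts 0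
    rw [hL]
    rw [pvBSearch]
    have hcnt : pvCntWhile pvCubes p n = 0 := by
      have := hcntL
      rw [hL] at this
      omega
    rw [hcnt]
    simp only [if_neg (by omega : ¬ (0 - 0 > 1))]
    omega
  · set k : Nat := (pvCntWhile pvCubes p n).toNat with hk
    have hkc : (k : Int) = pvCntWhile pvCubes p n := Int.toNat_of_nonneg hcnt0
    have hkL : k ≤ pvCubes.length := by omega
    rw [pvCubesArr_eq]
    obtain ⟨hA, hB, hrL⟩ :=
      pvBSearch_props pvCubes p n pvCubes.length pvCubes.length 0 (by omega) hL
        (le_refl _) (Or.inl rfl) (Or.inl rfl)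
    set r : Nat := pvBSearch pvCubes.toArray p n pvCubes.length 0 with hr
    have hvalid := pvCntWhile_valid pvCubes p n
    have hstop := pvCntWhile_stop pvCubes p n k hkc
    -- r = k - 1 when k ≥ 1, and r = 0 when k = 0
    have hrk : r = if k = 0 then 0 else k - 1 := by
      rcases hA with hr0 | hrv
      · -- r = 0
        rcases Nat.eq_zero_or_pos k with hk0 | hk1
        · rw [if_pos hk0]; exact hr0
        · -- k ≥ 1: show k = 1
          have hk1' : k ≤ r + 1 := by
            by_contra hgt
            have hv1 : pvCubes[r + 1]! * p ≤ n := hvalid (r + 1) (by omega)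
            rcases hB with hBL | hBv
            · omega
            · exact absurd hv1 (Int.not_le.mpr hBv)
          rw [if_neg (by omega)]
          omega
      · -- cs[r]! * p ≤ n: r < k
        have hrK : r < k := by
          by_contra hge'
          have hge : k ≤ r := by omega
          have hkL' : k < pvCubes.length := Nat.lt_of_le_of_lt hge hrL
          have hstopv := hstop hkL'
          have hmono : pvCubes[k]! ≤ pvCubes[r]! := pvCubes_mono hge hrL
          have : pvCubes[k]! * p ≤ pvCubes[r]! * p :=
            mul_le_mul_of_nonneg_right hmono hp
          have : pvCubes[k]! * p ≤ n := le_trans this hrv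
          exact absurd this (Int.not_le.mpr hstopv)
        have hk1' : k ≤ r + 1 := by
          by_contra hgt
          have hv1 : pvCubes[r + 1]! * p ≤ n := hvalid (r + 1) (by omega)
          rcases hB with hBL | hBv
          · omega
          · exact absurd hv1 (Int.not_le.mpr hBv)
        rw [if_neg (by omega)]
        omega
    rcases Nat.eq_zero_or_pos k with hk0 | hk1
    · rw [hrk, if_pos hk0]
      omega
    · rw [hrk, if_neg (by omega)]
      omega

-- the two loops agree when every element is nonnegative (indices stay nonnegative)
theorem pv_loop_eq (n : Int) :
    ∀ (l : List Int) (ans i : Int), 0 ≤ i → (∀ x ∈ l, 0 ≤ x) →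
      pvLoopA n pvPrimeList pvCubes.length l ans i = pvLoopB n l ans i := by
  intro l
  induction l with
  | nil => intro ans i _ _; rfl
  | cons x rest ih =>
    intro ans i hi h
    simp only [pvLoopA, pvLoopB]
    rw [pv_term_eq n x i (h x List.mem_cons_self) hi]
    exact ih _ _ (by omega) (fun y hy => h y (List.mem_cons_of_mem x hy))

theorem solve_eq_alt (n : Int) : solve n = solve_alt n := by
  unfold solve solve_alt
  exact pv_loop_eq n pvPrimeList 0 0 (le_refl 0) pvPrimeList_nonneg

-- ===== VERDICT (by name: the statement is the Claim_ definition above) =====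
theorem solve_spec : Claim_equal_solve := by
  intro n _
  unfold Spec_solve
  exact solve_eq_alt n
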